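-- pv_equiv track=rewrite | github.com/HugoFara/pylinkage | src/pylinkage/topology/enumeration.py | _generate_adjacency_matrices
-- ===== SOURCE A (Python) =====
-- def _generate_adjacency_matrices(
--     deg_seq: tuple[int, ...],
-- ) -> list[tuple[tuple[int, ...], ...]]:
--     """Generate all symmetric 0-1 adjacency matrices matching a degree sequence.
--
--     Uses recursive upper-triangle fill with pruning.
--     """
--     n = len(deg_seq)
--     # Working matrix
--     mat = [[0] * n for _ in range(n)]
--     remaining = list(deg_seq)
--     results: list[tuple[tuple[int, ...], ...]] = []
--
--     def _fill(row: int, col: int) -> None: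
--         if row >= n:
--             # Verify all degrees exhausted
--             if all(r == 0 for r in remaining):
--                 results.append(tuple(tuple(r) for r in mat))
--             return
--
--         next_row, next_col = (row, col + 1) if col + 1 < n else (row + 1, row + 2)
--
--         # Can we place 0 here? Check remaining degree budget
--         # For row i, remaining[i] must be fillable with the cells left in row i
--         can_skip = True
--         # remaining[row] must be <= number of unfilled cells in row
--         # remaining[col] must be <= number of unfilled cells in col
--
--         # Try placing 1 (edge between row and col)
--         if remaining[row] > 0 and remaining[col] > 0:
--             mat[row][col] = 1
--             mat[col][row] = 1
--             remaining[row] -= 1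
--             remaining[col] -= 1
--
--             if _is_feasible(mat, remaining, row, col, n):
--                 _fill(next_row, next_col)
--
--             mat[row][col] = 0
--             mat[col][row] = 0
--             remaining[row] += 1
--             remaining[col] += 1
--
--         # Try placing 0 (no edge)
--         if can_skip and _is_feasible_skip(mat, remaining, row, col, n):
--             _fill(next_row, next_col)
--
--     _fill(0, 1)
--     return results
--
-- def _is_feasible(
--     mat: list[list[int]],
--     remaining: list[int],
--     row: int,
--     col: int,
--     n: int,
-- ) -> bool:
--     """Check if the current partial matrix can still be completed."""
--     for i in range(n):
--         if remaining[i] < 0: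
--             return False
--         # Count unfilled cells for node i (upper triangle positions not yet visited)
--         unfilled = 0
--         for j in range(i + 1, n):
--             if (i, j) > (row, col) and mat[i][j] == 0:
--                 unfilled += 1
--         for j in range(0, i):
--             if (j, i) > (row, col) and mat[j][i] == 0:
--                 unfilled += 1
--         if remaining[i] > unfilled:
--             return False
--     return True
--
-- def _is_feasible_skip(
--     mat: list[list[int]],
--     remaining: list[int],
--     row: int,
--     col: int,
--     n: int,
-- ) -> bool:
--     """Check feasibility after skipping (placing 0)."""
--     return _is_feasible(mat, remaining, row, col, n)
-- ===== SOURCE B (Python) =====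
-- def _generate_adjacency_matrices(
--     deg_seq: tuple[int, ...],
-- ) -> list[tuple[tuple[int, ...], ...]]:
--     """Generate all symmetric 0-1 adjacency matrices matching a degree sequence.
--
--     Per-row subset enumeration: for each row i in turn, choose its whole
--     neighbour set among the still-positive later nodes as a k-subset
--     (k = residual degree of i), generated in descending indicator order,
--     with a uniform O(n) residual-degree bound checked on entering each row.
--     No matrix is materialised during the search; matrices are built only
--     from the accepted row choices at the end.
--     """
--     n = len(deg_seq)
--
--     def combos(pool, k):
--         # k-subsets of pool, in descending indicator-vector order
--         if k < 0 or k > len(pool):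
--             return []
--         if k == 0:
--             return [[]]
--         rest = pool[1:]
--         return [[pool[0]] + c for c in combos(rest, k - 1)] + combos(rest, k)
--
--     def rows(i, rem):
--         # all ways to pick neighbour sets for rows i..n-1
--         if any(rem[j] < 0 or rem[j] > n - 1 - i for j in range(i, n)):
--             return []
--         if i == n:
--             return [[]]
--         out = []
--         for s in combos([j for j in range(i + 1, n) if rem[j] > 0], rem[i]):
--             rem2 = list(rem)
--             rem2[i] = 0
--             for j in s:
--                 rem2[j] -= 1
--             for tail in rows(i + 1, rem2):
--                 out.append([s] + tail)
--         return out
--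
--     result = []
--     for choice in rows(0, list(deg_seq)):
--         mat = [[0] * n for _ in range(n)]
--         for i, s in enumerate(choice):
--             for j in s:
--                 mat[i][j] = 1
--                 mat[j][i] = 1
--         result.append(tuple(tuple(r) for r in mat))
--     return result
-- ===== Notes on version B (the rewrite author's own statement) =====
-- stated objective: alternative
-- what changed: B abandons A's per-cell 0/1 backtracking over a mutable matrix: it picks each row's entire neighbour set at once as a k-subset of the still-positive later nodes (combinations generated in descending indicator order), prunes with a uniform O(n) residual-degree bound only on entering a row, and builds matrices only from accepted row choices at the end; per search node this does O(n) work where A rescans the matrix in O(n^2), though on degree sequences with exponentially many matrices both are output-bound.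
-- outside the precondition, e.g. on _generate_adjacency_matrices((1,)): A raises IndexError, B returns []
import Mathlib
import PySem

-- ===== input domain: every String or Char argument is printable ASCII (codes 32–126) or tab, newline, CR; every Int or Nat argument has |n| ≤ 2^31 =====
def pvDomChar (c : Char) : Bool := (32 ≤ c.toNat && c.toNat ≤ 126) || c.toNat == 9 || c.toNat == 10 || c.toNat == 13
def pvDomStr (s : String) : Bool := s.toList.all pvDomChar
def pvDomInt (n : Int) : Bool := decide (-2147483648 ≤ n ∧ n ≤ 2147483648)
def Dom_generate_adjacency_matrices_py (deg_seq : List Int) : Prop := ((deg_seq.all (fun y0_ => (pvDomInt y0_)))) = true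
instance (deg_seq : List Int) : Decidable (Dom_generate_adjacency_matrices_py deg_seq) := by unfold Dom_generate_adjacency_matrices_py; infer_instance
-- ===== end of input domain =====

-- B replaces A's per-cell 0/1 backtracking (a matrix rescan at every cell) by per-row
-- k-subset enumeration over the still-positive later nodes, with a uniform residual-degree
-- bound checked on row entry; matrices are built only from accepted row choices at the end
-- (objective: alternative — a genuinely different organisation of the same exact search).

-- ===== PORT A =====
-- Python tuple comparison (i, j) > (row, col)
def pvGt (i j row col : Nat) : Bool := row < i || (i == row && col < j)

def pvAt (mat : List (List Int)) (i j : Nat) : Int := (mat.getD i []).getD j 0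

-- the two j-loops of _is_feasible counting unfilled cells for node i
def pvUnfilled (mat : List (List Int)) (i row col n : Nat) : Nat :=
  ((List.range' (i+1) (n - (i+1))).filter (fun j => pvGt i j row col && (pvAt mat i j == 0))).length
  + ((List.range' 0 i).filter (fun j => pvGt j i row col && (pvAt mat j i == 0))).length

def pvIsFeasible (mat : List (List Int)) (rem : List Int) (row col n : Nat) : Bool :=
  (List.range n).all (fun i =>
    !(rem.getD i 0 < 0) && !((pvUnfilled mat i row col n : Int) < rem.getD i 0))

def pvSetMat (mat : List (List Int)) (i j : Nat) (v : Int) : List (List Int) :=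
  mat.set i ((mat.getD i []).set j v)

def pvNext (n row col : Nat) : Nat × Nat :=
  if col + 1 < n then (row, col + 1) else (row + 1, row + 2)

-- the recursive _fill; Python's `can_skip` is constantly True and is dropped
def pvFillA (n row col : Nat) (mat : List (List Int)) (rem : List Int) : List (List (List Int)) :=
  if n ≤ row then
    (if rem.all (· == 0) then [mat] else [])
  else
    (if 0 < rem.getD row 0 && 0 < rem.getD col 0 then
       let mat1 := pvSetMat (pvSetMat mat row col 1) col row 1
       let rem1 := (rem.modify row (· - 1)).modify col (· - 1)
       if pvIsFeasible mat1 rem1 row col n then pvFillA n (pvNext n row col).1 (pvNext n row col).2 mat1 rem1 else []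
     else []) ++
    (if pvIsFeasible mat rem row col n then pvFillA n (pvNext n row col).1 (pvNext n row col).2 mat rem else [])
termination_by (n - row, n + 2 - col)
decreasing_by
  all_goals
    simp only [pvNext]
    split
    · exact Prod.Lex.right _ (by omega)
    · exact Prod.Lex.left _ _ (by omega)

def generate_adjacency_matrices_py (deg_seq : List Int) : List (List (List Int)) :=
  pvFillA deg_seq.length 0 1
    (List.replicate deg_seq.length (List.replicate deg_seq.length (0 : Int))) deg_seq

-- ===== PORT B =====
-- combos(pool, k): k-subsets of pool in descending indicator order
def altCombos (pool : List Nat) (k : Int) : List (List Nat) :=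
  if k < 0 || (pool.length : Int) < k then []
  else if k = 0 then [[]]
  else
    match pool with
    | [] => []  -- unreachable: the length guard forces pool ≠ [] when k > 0
    | x :: rest => ((altCombos rest (k - 1)).map (fun c => x :: c)) ++ altCombos rest k
termination_by pool.length
decreasing_by all_goals simp

-- the list comprehension [j for j in range(c, n) if rem[j] > 0] (rows uses c = i+1)
def altPool (n c : Nat) (rem : List Int) : List Nat :=
  (List.range' c (n - c)).filter (fun j => 0 < rem.getD j 0)

-- the decrement loop `for j in s: rem2[j] -= 1`
def altDec (rem : List Int) (s : List Nat) : List Int :=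
  s.foldl (fun r j => r.modify j (· - 1)) rem

-- rows(i, rem); Python's `i == n` test is reached only with i ≤ n, ported as n ≤ i
def altRows (n i : Nat) (rem : List Int) : List (List (List Nat)) :=
  if (List.range' i (n - i)).any
      (fun j => rem.getD j 0 < 0 || (n : Int) - 1 - (i : Int) < rem.getD j 0) then []
  else if n ≤ i then [[]]
  else
    (altCombos (altPool n (i+1) rem) (rem.getD i 0)).flatMap
      (fun s => (altRows n (i+1) (altDec (rem.set i 0) s)).map (fun tail => s :: tail))
termination_by n - i
decreasing_by simp_all; omega

-- the inner loop `for j in s: mat[i][j] = 1; mat[j][i] = 1`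
def altBuildRow (m : List (List Int)) (i : Nat) (s : List Nat) : List (List Int) :=
  s.foldl (fun m j => (m.modify i (fun r => r.set j 1)).modify j (fun r => r.set i 1)) m

-- the matrix-building loop `for i, s in enumerate(choice): ...`
def altBuild (n : Nat) (choice : List (List Nat)) : List (List Int) :=
  choice.zipIdx.foldl (fun m p => altBuildRow m p.2 p.1)
    (List.replicate n (List.replicate n (0 : Int)))

def generate_adjacency_matrices_py_alt (deg_seq : List Int) : List (List (List Int)) :=
  (altRows deg_seq.length 0 deg_seq).map (fun choice => altBuild deg_seq.length choice)

-- ===== PRECONDITION & SPEC =====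
-- Pre_ excludes only the one-element sequences [d] with d > 0, on which A raises
-- IndexError (remaining[col] with col = 1 out of range); B returns [] there.
def Pre_generate_adjacency_matrices_py (deg_seq : List Int) : Prop :=
  ¬ (deg_seq.length = 1 ∧ 0 < deg_seq.getD 0 0)
instance (deg_seq : List Int) : Decidable (Pre_generate_adjacency_matrices_py deg_seq) := by
  unfold Pre_generate_adjacency_matrices_py; infer_instance

def pvWitness_generate_adjacency_matrices_py : List Int := [1, 1]

def Spec_generate_adjacency_matrices_py (deg_seq : List Int) (out : List (List (List Int))) : Prop :=
  out = generate_adjacency_matrices_py_alt deg_seq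
instance (deg_seq : List Int) (out : List (List (List Int))) :
    Decidable (Spec_generate_adjacency_matrices_py deg_seq out) := by
  unfold Spec_generate_adjacency_matrices_py; infer_instance

-- ===== CLAIM (what is proved, stated in full; the proofs are below) =====
def Claim_equal_generate_adjacency_matrices_py : Prop :=
  ∀ (deg_seq : List Int), Dom_generate_adjacency_matrices_py deg_seq →
    Pre_generate_adjacency_matrices_py deg_seq →
    Spec_generate_adjacency_matrices_py deg_seq (generate_adjacency_matrices_py deg_seq)

-- ===== LEMMAS AND PROOFS =====


-- ---------- generic list-access lemmas ----------

lemma set_getD (l : List Int) (i : Nat) (v : Int) (j : Nat) :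
    (l.set i v).getD j 0 = if i = j ∧ i < l.length then v else l.getD j 0 := by
  simp only [List.getD_eq_getElem?_getD, List.getElem?_set]
  by_cases hij : i = j
  · subst hij
    by_cases hl : i < l.length
    · simp [hl]
    · simp [hl]
  · simp [hij]

lemma modify_getD (l : List Int) (x j : Nat) :
    (l.modify x (· - 1)).getD j 0 = l.getD j 0 - (if x = j ∧ j < l.length then 1 else 0) := by
  simp only [List.getD_eq_getElem?_getD, List.getElem?_modify]
  cases hx : l[j]? with
  | none =>
    have hj : l.length ≤ j := List.getElem?_eq_none_iff.mp hx
    simp [show ¬ j < l.length by omega]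
  | some v =>
    have hjl : j < l.length := by
      by_contra h
      rw [List.getElem?_eq_none_iff.mpr (by omega)] at hx; cases hx
    by_cases hxy : x = j <;> simp [hxy, hjl]

lemma list_eq_of_getD (l1 l2 : List Int) (hl : l1.length = l2.length)
    (h : ∀ j, l1.getD j 0 = l2.getD j 0) : l1 = l2 := by
  apply List.ext_getElem hl
  intro i h1 h2
  have := h i
  simpa [List.getD_eq_getElem?_getD, List.getElem?_eq_getElem, h1, h2] using this

lemma list_all_zero (rem : List Int) (n : Nat) (hlen : rem.length = n)
    (h : ∀ j, j < n → rem.getD j 0 = 0) : rem.all (· == 0) = true := by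
  rw [List.all_eq_true]
  intro x hx
  obtain ⟨i, hi, rfl⟩ := List.mem_iff_getElem.mp hx
  have := h i (by omega)
  rw [List.getD_eq_getElem?_getD, List.getElem?_eq_getElem hi] at this
  simp at this
  simp [this]

lemma set_self_eq (l : List Int) (i : Nat) (h : l.getD i 0 = 0) : l.set i 0 = l := by
  apply list_eq_of_getD _ _ (by simp)
  intro j
  rw [set_getD]
  split_ifs with hc
  · obtain ⟨rfl, _⟩ := hc; omega
  · rfl

-- ---------- altDec lemmas ----------

lemma dec_getD : ∀ (s : List Nat) (l : List Int) (j : Nat),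
    (altDec l s).getD j 0 = l.getD j 0 - (if j < l.length then (s.count j : Int) else 0) := by
  intro s
  induction s with
  | nil => intro l j; simp [altDec]
  | cons x s ih =>
    intro l j
    have step : altDec l (x :: s) = altDec (l.modify x (· - 1)) s := rfl
    rw [step, ih, modify_getD, List.length_modify]
    by_cases hj : j < l.length
    · by_cases hx : x = j <;> simp [hj, hx]; ring
    · simp [hj]

-- ---------- altCombos lemmas ----------

lemma combos_neg (p : List Nat) (k : Int) (h : k < 0) : altCombos p k = [] := by
  rw [altCombos.eq_def]; simp [h]

lemma combos_big (p : List Nat) (k : Int) (h : (p.length : Int) < k) : altCombos p k = [] := by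
  rw [altCombos.eq_def]; simp [h]

lemma combos_nil (k : Int) : altCombos [] k = if k = 0 then [[]] else [] := by
  rw [altCombos.eq_def]
  by_cases h0 : k = 0
  · subst h0; simp
  · by_cases hneg : k < 0
    · simp [hneg, h0]
    · simp [hneg, h0, show (0:Int) < k by omega]

lemma combos_cons (x : Nat) (xs : List Nat) (k : Int) :
    altCombos (x :: xs) k = ((altCombos xs (k - 1)).map (fun c => x :: c)) ++ altCombos xs k := by
  by_cases hneg : k < 0
  · rw [combos_neg _ _ hneg, combos_neg _ _ (by omega), combos_neg _ _ hneg]; rfl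
  by_cases h0 : k = 0
  · subst h0
    have hL : altCombos (x :: xs) 0 = [[]] := by rw [altCombos.eq_def]; simp; omega
    have hR : altCombos xs 0 = [[]] := by rw [altCombos.eq_def]; simp
    rw [hL, hR, combos_neg xs (0 - 1) (by omega)]
    rfl
  have hlc : ((x :: xs).length : Int) = (xs.length : Int) + 1 := by
    simp only [List.length_cons]; push_cast; ring
  by_cases hbig : ((x :: xs).length : Int) < k
  · have hxs : ((xs.length : Int)) < k := by omega
    rw [combos_big _ _ hbig, combos_big _ _ (by omega : (xs.length : Int) < k - 1),
      combos_big _ _ hxs]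
    rfl
  · rw [altCombos.eq_def]
    rw [if_neg (by simp only [Bool.or_eq_true, decide_eq_true_eq, not_or]; exact ⟨hneg, hbig⟩),
      if_neg h0]

lemma combos_sublist : ∀ (p : List Nat) (k : Int) (s : List Nat),
    s ∈ altCombos p k → s.Sublist p := by
  intro p
  induction p with
  | nil =>
    intro k s hs
    rw [combos_nil] at hs
    split_ifs at hs with h
    · simp at hs; simp [hs]
    · simp at hs
  | cons x xs ih =>
    intro k s hs
    rw [combos_cons, List.mem_append] at hs
    rcases hs with hs | hs
    · obtain ⟨c, hc, rfl⟩ := List.mem_map.mp hs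
      exact List.Sublist.cons₂ x (ih _ c hc)
    · exact List.Sublist.cons x (ih _ s hs)

-- ---------- altPool lemmas ----------

lemma pool_mem (n c : Nat) (rem : List Int) (j : Nat) (h : j ∈ altPool n c rem) :
    c ≤ j ∧ j < n ∧ 0 < rem.getD j 0 := by
  unfold altPool at h
  rw [List.mem_filter, List.mem_range'_1] at h
  refine ⟨h.1.1, by omega, by simpa using h.2⟩

lemma pool_len (n c : Nat) (rem : List Int) : (altPool n c rem).length ≤ n - c := by
  unfold altPool
  calc _ ≤ (List.range' c (n - c)).length := List.length_filter_le _ _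
    _ = n - c := by simp

lemma pool_nodup (n c : Nat) (rem : List Int) : (altPool n c rem).Nodup :=
  List.Nodup.filter _ (List.nodup_range' 1)

lemma pool_nil (n : Nat) (rem : List Int) : altPool n n rem = [] := by
  unfold altPool; simp

lemma pool_cons (n c : Nat) (rem : List Int) (h1 : c < n) (h2 : 0 < rem.getD c 0) :
    altPool n c rem = c :: altPool n (c + 1) rem := by
  unfold altPool
  rw [show n - c = (n - (c+1)) + 1 by omega, List.range'_succ, List.filter_cons]
  rw [List.getD_eq_getElem?_getD] at h2
  simp [h2]

lemma pool_skip (n c : Nat) (rem : List Int) (h1 : c < n) (h2 : ¬ 0 < rem.getD c 0) :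
    altPool n c rem = altPool n (c + 1) rem := by
  unfold altPool
  rw [show n - c = (n - (c+1)) + 1 by omega, List.range'_succ, List.filter_cons]
  rw [List.getD_eq_getElem?_getD] at h2
  simp [h2]

lemma pool_congr (n c : Nat) (rem1 rem2 : List Int)
    (h : ∀ j, c ≤ j → j < n → rem1.getD j 0 = rem2.getD j 0) :
    altPool n c rem1 = altPool n c rem2 := by
  unfold altPool
  apply List.filter_congr
  intro j hj
  rw [List.mem_range'_1] at hj
  rw [h j hj.1 (by omega)]

lemma combos_count_le_one (n c : Nat) (rem : List Int) (k : Int) (s : List Nat) (j : Nat)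
    (hs : s ∈ altCombos (altPool n c rem) k) : s.count j ≤ 1 :=
  le_trans (List.Sublist.count_le j (combos_sublist _ _ _ hs))
    (List.nodup_iff_count_le_one.mp (pool_nodup n c rem) j)

lemma combos_count_lt (n c : Nat) (rem : List Int) (k : Int) (s : List Nat) (j : Nat)
    (hs : s ∈ altCombos (altPool n c rem) k) (hj : j < c) : s.count j = 0 := by
  rw [List.count_eq_zero]
  intro hmem
  have := pool_mem n c rem j ((combos_sublist _ _ _ hs).subset hmem)
  omega


-- ---------- matrix-building lemmas ----------

-- the in-place row write of B is the same matrix update A performs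
lemma modify_set_eq (m : List (List Int)) (i j : Nat) (v : Int) :
    m.modify i (fun r => r.set j v) = pvSetMat m i j v := by
  unfold pvSetMat
  apply List.ext_getElem?
  intro t
  rw [List.getElem?_modify, List.getElem?_set]
  by_cases hit : i = t
  · subst hit
    by_cases hl : i < m.length
    · rw [List.getElem?_eq_getElem hl]
      simp [List.getD_eq_getElem?_getD, List.getElem?_eq_getElem hl, hl]
    · rw [List.getElem?_eq_none_iff.mpr (by omega)]
      simp [hl]
  · simp [hit]

lemma buildRow_snoc (m : List (List Int)) (i : Nat) (s : List Nat) (c : Nat) :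
    altBuildRow m i (s ++ [c]) = pvSetMat (pvSetMat (altBuildRow m i s) i c 1) c i 1 := by
  simp [altBuildRow, List.foldl_append, modify_set_eq]

lemma build_append (n : Nat) (pre : List (List Nat)) (Q : List Nat) :
    altBuild n (pre ++ [Q]) = altBuildRow (altBuild n pre) pre.length Q := by
  unfold altBuild
  rw [List.zipIdx_append, List.foldl_append]
  simp

lemma build_snoc_nil (n : Nat) (pre : List (List Nat)) :
    altBuild n (pre ++ [[]]) = altBuild n pre := by
  rw [build_append]; rfl

lemma build_edge (n : Nat) (pre : List (List Nat)) (P : List Nat) (c : Nat) :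
    altBuild n (pre ++ [P ++ [c]]) =
      pvSetMat (pvSetMat (altBuild n (pre ++ [P])) pre.length c 1) c pre.length 1 := by
  rw [build_append, build_append, buildRow_snoc]

lemma build_single_nil (n : Nat) :
    altBuild n [[]] = List.replicate n (List.replicate n (0 : Int)) := rfl

-- ---------- pvAt lemmas ----------

lemma getDrow_set (m : List (List Int)) (a : Nat) (r : List Int) (i : Nat) :
    ((m.set a r).getD i []) = if i = a ∧ a < m.length then r else m.getD i [] := by
  simp only [List.getD_eq_getElem?_getD, List.getElem?_set]
  by_cases hia : a = i
  · subst hia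
    by_cases hl : a < m.length
    · simp [hl]
    · simp [hl]
  · have hni : ¬ (i = a ∧ a < m.length) := fun hh => hia hh.1.symm
    simp [hia, hni]

lemma getDint_set (r : List Int) (b : Nat) (v : Int) (j : Nat) (h : j ≠ b) :
    ((r.set b v).getD j 0) = r.getD j 0 := by
  simp only [List.getD_eq_getElem?_getD, List.getElem?_set]
  simp [show ¬ b = j from fun hh => h hh.symm]

lemma pvAt_setMat_ne (m : List (List Int)) (a b i j : Nat) (v : Int)
    (h : ¬ (i = a ∧ j = b)) : pvAt (pvSetMat m a b v) i j = pvAt m i j := by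
  unfold pvAt pvSetMat
  rw [getDrow_set]
  split_ifs with h1
  · obtain ⟨hia, _⟩ := h1
    subst hia
    exact getDint_set _ _ _ _ (fun hh => h ⟨rfl, hh⟩)
  · rfl

lemma pvAt_replicate (n i j : Nat) :
    pvAt (List.replicate n (List.replicate n (0 : Int))) i j = 0 := by
  unfold pvAt
  by_cases hi : i < n
  · by_cases hj : j < n <;>
      simp [List.getD_eq_getElem?_getD, hi, hj]
  · simp [List.getD_eq_getElem?_getD, hi]

-- ---------- feasibility characterisation ----------

def capC (n i row col : Nat) : Int :=
  if i < row then 0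
  else if i = row then (if col < n - 1 then (n : Int) - 1 - col else 0)
  else (n : Int) - 2 - row + (if col < i then 1 else 0)

def feasC (n : Nat) (rem : List Int) (row col : Nat) : Bool :=
  (List.range n).all (fun i => 0 ≤ rem.getD i 0 && rem.getD i 0 ≤ capC n i row col)

lemma countLt (c : Nat) : ∀ (l s : Nat),
    ((List.range' s l).filter (fun j => decide (c < j))).length = l - (c + 1 - s) := by
  intro l
  induction l with
  | zero => intro s; simp
  | succ m ih =>
    intro s
    simp only [List.range'_succ, List.filter_cons]
    by_cases h : c < s
    · simp [h, ih (s+1)]; omega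
    · simp [h, ih (s+1)]; omega

lemma countLe (c : Nat) : ∀ (l s : Nat),
    ((List.range' s l).filter (fun j => decide (c ≤ j))).length = l - (c - s) := by
  intro l
  induction l with
  | zero => intro s; simp
  | succ m ih =>
    intro s
    simp only [List.range'_succ, List.filter_cons]
    by_cases h : c ≤ s
    · simp [h, ih (s+1)]; omega
    · simp [h, ih (s+1)]; omega

-- on a matrix whose cells strictly after (row, col) are all unset, A's counted
-- `unfilled` equals the closed-form capacity
lemma unfilled_eq_cap (mat : List (List Int)) (n i row col : Nat)
    (hi : i < n) (hrc : row < col)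
    (hmat : ∀ a b, a < b → b < n → pvGt a b row col = true → pvAt mat a b = 0) :
    (pvUnfilled mat i row col n : Int) = capC n i row col := by
  unfold pvUnfilled
  by_cases h1 : i < row
  · have hA : List.filter (fun j => pvGt i j row col && (pvAt mat i j == 0))
        (List.range' (i+1) (n - (i+1))) = [] := by
      rw [List.filter_eq_nil_iff]
      intro j hj
      have hg : pvGt i j row col = false := by simp [pvGt]; omega
      simp [hg]
    have hB : List.filter (fun j => pvGt j i row col && (pvAt mat j i == 0))
        (List.range' 0 i) = [] := by
      rw [List.filter_eq_nil_iff]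
      intro j hj
      rw [List.mem_range'_1] at hj
      have hg : pvGt j i row col = false := by simp [pvGt]; omega
      simp [hg]
    have hcap : capC n i row col = 0 := by unfold capC; rw [if_pos h1]
    rw [hA, hB, hcap]
    simp
  · by_cases h2 : i = row
    · subst h2
      have hA : List.filter (fun j => pvGt i j i col && (pvAt mat i j == 0))
          (List.range' (i+1) (n - (i+1))) =
          List.filter (fun j => decide (col < j)) (List.range' (i+1) (n - (i+1))) := by
        apply List.filter_congr
        intro j hj
        rw [List.mem_range'_1] at hj
        by_cases hcj : col < j
        · have hz : pvAt mat i j = 0 :=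
            hmat i j (by omega) (by omega) (by simp [pvGt]; omega)
          simp [pvGt, hz, hcj]
        · simp [pvGt, hcj]
      have hB : List.filter (fun j => pvGt j i i col && (pvAt mat j i == 0))
          (List.range' 0 i) = [] := by
        rw [List.filter_eq_nil_iff]
        intro j hj
        rw [List.mem_range'_1] at hj
        have hg : pvGt j i i col = false := by simp [pvGt]; omega
        simp [hg]
      have hcap : capC n i i col = if col < n - 1 then (n : Int) - 1 - col else 0 := by
        unfold capC
        rw [if_neg (lt_irrefl i), if_pos rfl]
      rw [hA, hB, countLt, hcap]
      simp only [List.length_nil, Nat.add_zero]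
      split <;> omega
    · have h3 : row < i := by omega
      have hA : List.filter (fun j => pvGt i j row col && (pvAt mat i j == 0))
          (List.range' (i+1) (n - (i+1))) = List.range' (i+1) (n - (i+1)) := by
        rw [List.filter_eq_self]
        intro j hj
        rw [List.mem_range'_1] at hj
        have hz : pvAt mat i j = 0 :=
          hmat i j (by omega) (by omega) (by simp [pvGt]; omega)
        simp [pvGt, hz, h3]
      have hB : List.filter (fun j => pvGt j i row col && (pvAt mat j i == 0))
          (List.range' 0 i) =
          List.filter (fun j => decide (row < j) || (j == row && decide (col < i)))
            (List.range' 0 i) := by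
        apply List.filter_congr
        intro j hj
        rw [List.mem_range'_1] at hj
        by_cases hgt : pvGt j i row col = true
        · have hz : pvAt mat j i = 0 := hmat j i (by omega) (by omega) hgt
          rw [hgt, hz]
          simp [pvGt] at hgt
          simp
          omega
        · rw [Bool.not_eq_true] at hgt
          rw [hgt]
          simp [pvGt] at hgt
          simp
          omega
      have hcap : capC n i row col = (n : Int) - 2 - row + if col < i then 1 else 0 := by
        unfold capC
        rw [if_neg h1, if_neg h2]
      rw [hA, hB, List.length_range', hcap]
      by_cases hci : col < i
      · have hB2 : List.filter (fun j => decide (row < j) || (j == row && decide (col < i)))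
            (List.range' 0 i) = List.filter (fun j => decide (row ≤ j)) (List.range' 0 i) := by
          apply List.filter_congr
          intro j hj
          by_cases hjr : j = row
          · subst hjr; simp [hci]
          · have hbr : (j == row) = false := beq_eq_false_iff_ne.mpr hjr
            simp [hbr, hci]
            omega
        rw [hB2, countLe, if_pos hci]
        omega
      · have hB2 : List.filter (fun j => decide (row < j) || (j == row && decide (col < i)))
            (List.range' 0 i) = List.filter (fun j => decide (row < j)) (List.range' 0 i) := by
          apply List.filter_congr
          intro j hj
          by_cases hjr : j = row
          · subst hjr; simp [hci]
          · have hbr : (j == row) = false := beq_eq_false_iff_ne.mpr hjr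
            simp [hbr]
        rw [hB2, countLt, if_neg hci]
        omega

lemma feas_eq (mat : List (List Int)) (n row col : Nat) (rem : List Int)
    (hrc : row < col)
    (hmat : ∀ a b, a < b → b < n → pvGt a b row col = true → pvAt mat a b = 0) :
    pvIsFeasible mat rem row col n = feasC n rem row col := by
  unfold pvIsFeasible feasC
  rw [Bool.eq_iff_iff]
  simp only [List.all_eq_true, List.mem_range]
  have hpt : ∀ i, i < n →
      ((!(rem.getD i 0 < 0) && !((pvUnfilled mat i row col n : Int) < rem.getD i 0)) =
        (0 ≤ rem.getD i 0 && rem.getD i 0 ≤ capC n i row col)) := by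
    intro i hi
    rw [unfilled_eq_cap mat n i row col hi hrc hmat]
    rw [Bool.eq_iff_iff]
    simp only [Bool.and_eq_true, Bool.not_eq_true', decide_eq_false_iff_not, decide_eq_true_eq,
      not_lt]
  constructor <;> intro H i hi
  · rw [← hpt i hi]; exact H i hi
  · rw [hpt i hi]; exact H i hi

lemma feasC_true_iff (n : Nat) (rem : List Int) (row col : Nat) :
    feasC n rem row col = true ↔
      ∀ i, i < n → 0 ≤ rem.getD i 0 ∧ rem.getD i 0 ≤ capC n i row col := by
  unfold feasC
  simp [List.all_eq_true]


lemma combos_zero (p : List Nat) : altCombos p 0 = [[]] := by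
  rw [altCombos.eq_def]; simp

lemma pvGt_mono_col (i j row col : Nat) (h : pvGt i j row (col+1) = true) :
    pvGt i j row col = true := by
  simp [pvGt] at *; omega

lemma pvGt_mono_row (i j row col c2 : Nat) (h : pvGt i j (row+1) c2 = true) :
    pvGt i j row col = true := by
  simp [pvGt] at *; omega

lemma altRows_dead (n i : Nat) (rem : List Int) (j : Nat) (h1 : i ≤ j) (h2 : j < n)
    (h3 : rem.getD j 0 < 0 ∨ (n : Int) - 1 - (i : Int) < rem.getD j 0) :
    altRows n i rem = [] := by
  rw [altRows, if_pos]
  rw [List.any_eq_true]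
  refine ⟨j, List.mem_range'_1.mpr ⟨h1, by omega⟩, ?_⟩
  simpa using h3

lemma altRows_unfold (n i : Nat) (rem : List Int) (hin : i < n)
    (hguard : ∀ j, i ≤ j → j < n → 0 ≤ rem.getD j 0 ∧ rem.getD j 0 ≤ (n : Int) - 1 - (i : Int)) :
    altRows n i rem =
      (altCombos (altPool n (i+1) rem) (rem.getD i 0)).flatMap
        (fun s => (altRows n (i+1) (altDec (rem.set i 0) s)).map (fun tail => s :: tail)) := by
  have hg : ((List.range' i (n - i)).any
      (fun j => rem.getD j 0 < 0 || (n : Int) - 1 - (i : Int) < rem.getD j 0)) = false := by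
    rw [List.any_eq_false]
    intro j hj
    rw [List.mem_range'_1] at hj
    have := hguard j hj.1 (by omega)
    simp at this ⊢
    omega
  rw [altRows, hg]
  simp [show ¬ n ≤ i by omega]

-- if the A-side capacity check fails at (row, col), the whole corresponding
-- per-row subset region of B is empty
lemma dead_flatMap (n row col : Nat) (rem rem' : List Int) (hlen : rem.length = n)
    (hrown : row < n) (hrc : row ≤ col) (hcoln : col ≤ n)
    (h0 : ∀ j, j < row → rem.getD j 0 = 0)
    (hfeas : feasC n rem row col = false)
    (g : List Nat → List (List Nat) → List (List Int)) :
    (altCombos (altPool n (col+1) rem') (rem.getD row 0)).flatMap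
      (fun s => (altRows n (row+1) (altDec (rem.set row 0) s)).map (g s)) = [] := by
  have hviol : ∃ i, i < n ∧ ¬ (0 ≤ rem.getD i 0 ∧ rem.getD i 0 ≤ capC n i row col) := by
    by_contra hc
    push_neg at hc
    have := (feasC_true_iff n rem row col).mpr hc
    rw [hfeas] at this
    simp at this
  obtain ⟨i, hin, hbad⟩ := hviol
  rw [not_and_or, not_le, not_le] at hbad
  by_cases hir : i < row
  · exfalso
    have hz := h0 i hir
    have hcap : capC n i row col = 0 := by unfold capC; rw [if_pos hir]
    rw [hz, hcap] at hbad
    rcases hbad with h | h <;> omega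
  by_cases hieq : i = row
  · subst hieq
    -- the current row's own budget is violated: the subset list is empty
    have hcap : capC n i i col = if col < n - 1 then (n : Int) - 1 - col else 0 := by
      unfold capC
      rw [if_neg (by omega), if_pos rfl]
    rcases hbad with hneg | hbig
    · rw [combos_neg _ _ hneg]; rfl
    · rw [hcap] at hbig
      have hplen : ((altPool n (col+1) rem').length : Int) < rem.getD i 0 := by
        have h1 : (altPool n (col+1) rem').length ≤ n - (col+1) := pool_len _ _ _
        by_cases hc1 : col < n - 1
        · rw [if_pos hc1] at hbig; omega
        · rw [if_neg hc1] at hbig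
          have : n - (col+1) = 0 := by omega
          omega
      rw [combos_big _ _ hplen]; rfl
  · -- a later node's budget is violated: every deeper row search dies on entry
    have hri : row < i := by omega
    rw [List.flatMap_eq_nil_iff]
    intro s hs
    have hcnt1 : s.count i ≤ 1 := combos_count_le_one _ _ _ _ _ _ hs
    have hdj : (altDec (rem.set row 0) s).getD i 0 =
        rem.getD i 0 - (s.count i : Int) := by
      rw [dec_getD, List.length_set, hlen, if_pos hin,
        getDint_set _ _ _ _ (by omega : i ≠ row)]
    have hcap : capC n i row col = (n : Int) - 2 - row + (if col < i then 1 else 0) := by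
      unfold capC
      rw [if_neg (by omega), if_neg hieq]
    rw [hcap] at hbad
    have hdead : altRows n (row+1) (altDec (rem.set row 0) s) = [] := by
      apply altRows_dead n (row+1) _ i (by omega) hin
      rw [hdj]
      rcases hbad with hneg | hbig
      · left; omega
      · right
        by_cases hci : col < i
        · rw [if_pos hci] at hbig
          push_cast
          omega
        · have hc0 : s.count i = 0 := combos_count_lt _ _ _ _ _ _ hs (by omega)
          rw [if_neg hci] at hbig
          rw [hc0]
          push_cast
          omega
    rw [hdead]
    rfl

-- the main correspondence: A's cell-by-cell fill from (row, col), on the matrix built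
-- from the already-chosen rows `pre` and partial current row `P`, equals B's
-- subset enumeration of the rest of the current row followed by the deeper rows
lemma pvMain (n : Nat) : ∀ (row col : Nat) (rem : List Int) (pre : List (List Nat)) (P : List Nat),
    row < col → col ≤ n → row < n → rem.length = n → pre.length = row →
    (∀ j, j < row → rem.getD j 0 = 0) →
    (∀ a b, a < b → b < n → pvGt a b row col = true → pvAt (altBuild n (pre ++ [P])) a b = 0) →
    pvFillA n row col (altBuild n (pre ++ [P])) rem =
      (altCombos (altPool n col rem) (rem.getD row 0)).flatMap
        (fun s => (altRows n (row + 1) (altDec (rem.set row 0) s)).map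
          (fun tail => altBuild n (pre ++ (P ++ s) :: tail))) := by
  intro row col rem pre P hrc hcoln hrown hlen hpre h0 hmat
  have hnrow : ¬ n ≤ row := by omega
  -- shared row-boundary advance: entering row+1 with residuals rem2 and completed row P2
  have hadvB : ∀ (rem2 : List Int) (P2 : List Nat),
      rem2.length = n → (∀ j, j < row + 1 → rem2.getD j 0 = 0) →
      (∀ a b, a < b → b < n → pvGt a b (row+1) (row+2) = true →
        pvAt (altBuild n (pre ++ [P2])) a b = 0) →
      (∀ j, row + 1 ≤ j → j < n →
        0 ≤ rem2.getD j 0 ∧ rem2.getD j 0 ≤ (n : Int) - 1 - ((row : Int) + 1)) →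
      row + 1 < n →
      pvFillA n (row+1) (row+2) (altBuild n (pre ++ [P2])) rem2 =
        (altRows n (row+1) rem2).map (fun tail => altBuild n (pre ++ P2 :: tail)) := by
    intro rem2 P2 hlen2 h02 hmat2 hguard2 hr1
    rw [altRows_unfold n (row+1) rem2 hr1 (by
      intro j hj1 hj2
      have := hguard2 j hj1 hj2
      push_cast
      push_cast at this
      exact this)]
    have hmat2' : ∀ a b, a < b → b < n → pvGt a b (row+1) (row+2) = true →
        pvAt (altBuild n ((pre ++ [P2]) ++ [[]])) a b = 0 := by
      rw [build_snoc_nil]; exact hmat2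
    have hIH := pvMain n (row+1) (row+2) rem2 (pre ++ [P2]) [] (by omega) (by omega) hr1
      hlen2 (by simp [hpre]) h02 hmat2'
    rw [build_snoc_nil] at hIH
    rw [hIH, List.map_flatMap]
    congr 1
    funext s'
    rw [List.map_map]
    congr 1
    funext tail
    simp
  by_cases hcol : col < n
  · -- an actual cell (row, col)
    rw [pvFillA, if_neg hnrow]
    have hmat1 : ∀ a b, a < b → b < n → pvGt a b row col = true →
        pvAt (pvSetMat (pvSetMat (altBuild n (pre ++ [P])) row col 1) col row 1) a b = 0 := by
      intro a b hab hbn hg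
      rw [pvAt_setMat_ne _ _ _ _ _ _ (by rintro ⟨rfl, rfl⟩; omega)]
      rw [pvAt_setMat_ne _ _ _ _ _ _ (by
        rintro ⟨rfl, rfl⟩
        simp [pvGt] at hg)]
      exact hmat a b hab hbn hg
    -- the skip branch equals the part of B that omits col
    have hskip : (if pvIsFeasible (altBuild n (pre ++ [P])) rem row col n = true then
          pvFillA n (pvNext n row col).1 (pvNext n row col).2 (altBuild n (pre ++ [P])) rem
        else []) =
        (altCombos (altPool n (col+1) rem) (rem.getD row 0)).flatMap
          (fun s => (altRows n (row+1) (altDec (rem.set row 0) s)).map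
            (fun tail => altBuild n (pre ++ (P ++ s) :: tail))) := by
      rw [feas_eq _ n row col rem hrc hmat]
      by_cases hfeas : feasC n rem row col = true
      · rw [if_pos hfeas]
        have hfacts := (feasC_true_iff n rem row col).mp hfeas
        by_cases hc1 : col + 1 < n
        · have hnx1 : pvNext n row col = (row, col+1) := by unfold pvNext; rw [if_pos hc1]
          rw [hnx1]
          exact pvMain n row (col+1) rem pre P (by omega) (by omega) hrown hlen hpre h0
            (fun a b hab hbn hg => hmat a b hab hbn (pvGt_mono_col _ _ _ _ hg))
        · have hceq : col + 1 = n := by omega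
          have hnx1 : pvNext n row col = (row+1, row+2) := by unfold pvNext; rw [if_neg hc1]
          rw [hnx1]
          have hk0 : rem.getD row 0 = 0 := by
            have := hfacts row hrown
            unfold capC at this
            rw [if_neg (by omega), if_pos rfl, if_neg (by omega : ¬ col < n - 1)] at this
            omega
          have hpool : altPool n (col+1) rem = [] := by rw [hceq]; exact pool_nil n rem
          rw [hpool, hk0, combos_zero]
          have hdecid : altDec (rem.set row 0) [] = rem := by
            show rem.set row 0 = rem
            exact set_self_eq rem row hk0
          simp only [List.flatMap_cons, List.flatMap_nil, List.append_nil, hdecid,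
            List.append_nil]
          have hguard2 : ∀ j, row + 1 ≤ j → j < n →
              0 ≤ rem.getD j 0 ∧ rem.getD j 0 ≤ (n : Int) - 1 - ((row : Int) + 1) := by
            intro j hj1 hj2
            have := hfacts j hj2
            unfold capC at this
            rw [if_neg (by omega), if_neg (by omega), if_neg (by omega : ¬ col < j)] at this
            omega
          have h02 : ∀ j, j < row + 1 → rem.getD j 0 = 0 := by
            intro j hj
            rcases Nat.lt_or_ge j row with h | h
            · exact h0 j h
            · have hjr : j = row := by omega
              rw [hjr]; exact hk0
          exact hadvB rem P hlen h02
            (fun a b hab hbn hg => hmat a b hab hbn (pvGt_mono_row _ _ _ _ _ hg))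
            hguard2 (by omega)
      · rw [Bool.not_eq_true] at hfeas
        rw [if_neg (by rw [hfeas]; simp)]
        exact (dead_flatMap n row col rem rem hlen hrown (le_of_lt hrc) (by omega) h0 hfeas
          (fun s => fun tail => altBuild n (pre ++ (P ++ s) :: tail))).symm
    by_cases hcp : 0 < rem.getD col 0
    · rw [pool_cons n col rem hcol hcp, combos_cons, List.flatMap_append, List.flatMap_map,
        hskip]
      congr 1
      · -- the place-an-edge branch equals the part of B that takes col
        by_cases hkp : 0 < rem.getD row 0
        · rw [if_pos (by simp only [Bool.and_eq_true, decide_eq_true_eq]; exact ⟨hkp, hcp⟩)]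
          have hbuild : altBuild n (pre ++ [P ++ [col]]) =
              pvSetMat (pvSetMat (altBuild n (pre ++ [P])) row col 1) col row 1 := by
            rw [build_edge, hpre]
          have hfe1 : pvIsFeasible
              (pvSetMat (pvSetMat (altBuild n (pre ++ [P])) row col 1) col row 1)
              ((rem.modify row (· - 1)).modify col (· - 1)) row col n =
              feasC n ((rem.modify row (· - 1)).modify col (· - 1)) row col :=
            feas_eq _ n row col _ hrc hmat1
          simp only [hfe1]
          have hlen1 : ((rem.modify row (· - 1)).modify col (· - 1)).length = n := by
            simp [List.length_modify, hlen]
          have hr1row : ((rem.modify row (· - 1)).modify col (· - 1)).getD row 0 =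
              rem.getD row 0 - 1 := by
            rw [modify_getD, List.length_modify, modify_getD]
            rw [if_neg (by omega : ¬ (col = row ∧ row < rem.length)),
              if_pos ⟨rfl, by omega⟩]
            ring
          have h01 : ∀ j, j < row → ((rem.modify row (· - 1)).modify col (· - 1)).getD j 0 = 0 := by
            intro j hj
            rw [modify_getD, List.length_modify, modify_getD,
              if_neg (by omega : ¬ (col = j ∧ j < rem.length)),
              if_neg (by omega : ¬ (row = j ∧ j < rem.length))]
            simpa using h0 j hj
          have hpool1 : altPool n (col+1) ((rem.modify row (· - 1)).modify col (· - 1)) =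
              altPool n (col+1) rem := by
            apply pool_congr
            intro j hj1 hj2
            rw [modify_getD, List.length_modify, modify_getD,
              if_neg (by omega : ¬ (col = j ∧ j < rem.length)),
              if_neg (by omega : ¬ (row = j ∧ j < rem.length))]
            ring
          have hsets : ((rem.modify row (· - 1)).modify col (· - 1)).set row 0 =
              (rem.set row 0).modify col (· - 1) := by
            apply list_eq_of_getD
            · simp [List.length_modify, List.length_set]
            · intro j
              have hR : ((rem.set row 0).modify col (· - 1)).getD j 0 =
                  (if row = j ∧ row < rem.length then 0 else rem.getD j 0) -
                    (if col = j ∧ j < rem.length then 1 else 0) := by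
                rw [modify_getD, List.length_set, set_getD]
              have hL : ((((rem.modify row (· - 1)).modify col (· - 1))).set row 0).getD j 0 =
                  if row = j ∧ row < rem.length then 0 else
                    (rem.getD j 0 - (if row = j ∧ j < rem.length then 1 else 0) -
                      (if col = j ∧ j < rem.length then 1 else 0)) := by
                rw [set_getD, modify_getD, modify_getD]
                simp only [List.length_modify]
              rw [hL, hR]
              split_ifs <;> omega
          have hdec1 : ∀ c : List Nat,
              altDec (((rem.modify row (· - 1)).modify col (· - 1)).set row 0) c =
              altDec (rem.set row 0) (col :: c) := by
            intro c
            rw [hsets]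
            rfl
          by_cases hfeas1 : feasC n ((rem.modify row (· - 1)).modify col (· - 1)) row col = true
          · rw [if_pos hfeas1]
            have hfacts1 := (feasC_true_iff n _ row col).mp hfeas1
            by_cases hc1 : col + 1 < n
            · have hnx1 : pvNext n row col = (row, col+1) := by unfold pvNext; rw [if_pos hc1]
              rw [hnx1]
              have hIH := pvMain n row (col+1) ((rem.modify row (· - 1)).modify col (· - 1))
                pre (P ++ [col]) (by omega) (by omega) hrown hlen1 hpre h01
                (by
                  intro a b hab hbn hg
                  rw [hbuild]
                  exact hmat1 a b hab hbn (pvGt_mono_col _ _ _ _ hg))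
              rw [hbuild] at hIH
              rw [hIH, hpool1, hr1row]
              congr 1
              funext c
              rw [hdec1 c]
              congr 1
              funext tail
              simp
            · have hceq : col + 1 = n := by omega
              have hnx1 : pvNext n row col = (row+1, row+2) := by unfold pvNext; rw [if_neg hc1]
              rw [hnx1]
              have hk1 : ((rem.modify row (· - 1)).modify col (· - 1)).getD row 0 = 0 := by
                have := hfacts1 row hrown
                unfold capC at this
                rw [if_neg (by omega), if_pos rfl, if_neg (by omega : ¬ col < n - 1)] at this
                omega
              have hpool : altPool n (col+1) rem = [] := by rw [hceq]; exact pool_nil n rem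
              rw [hpool, show rem.getD row 0 - 1 = 0 from by omega, combos_zero]
              simp only [List.flatMap_cons, List.flatMap_nil, List.append_nil]
              have hdecw : altDec (rem.set row 0) (col :: []) =
                  (rem.modify row (· - 1)).modify col (· - 1) := by
                rw [← hdec1 []]
                show ((rem.modify row (· - 1)).modify col (· - 1)).set row 0 = _
                exact set_self_eq _ row hk1
              rw [hdecw]
              have hguard2 : ∀ j, row + 1 ≤ j → j < n →
                  0 ≤ ((rem.modify row (· - 1)).modify col (· - 1)).getD j 0 ∧
                  ((rem.modify row (· - 1)).modify col (· - 1)).getD j 0 ≤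
                    (n : Int) - 1 - ((row : Int) + 1) := by
                intro j hj1 hj2
                have := hfacts1 j hj2
                unfold capC at this
                rw [if_neg (by omega), if_neg (by omega), if_neg (by omega : ¬ col < j)] at this
                omega
              have h02 : ∀ j, j < row + 1 →
                  ((rem.modify row (· - 1)).modify col (· - 1)).getD j 0 = 0 := by
                intro j hj
                rcases Nat.lt_or_ge j row with h | h
                · exact h01 j h
                · have hjr : j = row := by omega
                  rw [hjr]; exact hk1
              have hfin := hadvB ((rem.modify row (· - 1)).modify col (· - 1)) (P ++ [col])
                hlen1 h02
                (by
                  intro a b hab hbn hg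
                  rw [hbuild]
                  exact hmat1 a b hab hbn (pvGt_mono_row _ _ _ _ _ hg))
                hguard2 (by omega)
              rw [hbuild] at hfin
              rw [hfin]
          · rw [Bool.not_eq_true] at hfeas1
            rw [if_neg (by rw [hfeas1]; simp)]
            symm
            have hrw : (altCombos (altPool n (col+1) rem) (rem.getD row 0 - 1)).flatMap
                (fun c => (altRows n (row+1) (altDec (rem.set row 0) (col :: c))).map
                  (fun tail => altBuild n (pre ++ (P ++ col :: c) :: tail))) =
                (altCombos (altPool n (col+1) rem)
                    (((rem.modify row (· - 1)).modify col (· - 1)).getD row 0)).flatMap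
                  (fun c => (altRows n (row+1)
                      (altDec (((rem.modify row (· - 1)).modify col (· - 1)).set row 0) c)).map
                    (fun tail => altBuild n (pre ++ (P ++ col :: c) :: tail))) := by
              rw [hr1row]
              congr 1
              funext c
              rw [hdec1 c]
            rw [hrw]
            exact dead_flatMap n row col ((rem.modify row (· - 1)).modify col (· - 1)) rem
              hlen1 hrown (le_of_lt hrc) (by omega) h01 hfeas1
              (fun c => fun tail => altBuild n (pre ++ (P ++ col :: c) :: tail))
        · rw [if_neg (by simp only [Bool.and_eq_true, decide_eq_true_eq]; exact fun h => hkp h.1)]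
          rw [combos_neg _ _ (by omega : rem.getD row 0 - 1 < 0)]
          rfl
    · rw [pool_skip n col rem hcol hcp]
      rw [if_neg (by simp only [Bool.and_eq_true, decide_eq_true_eq]; exact fun h => hcp h.2)]
      rw [List.nil_append]
      exact hskip
  · -- col = n: the phantom cell at the end of a row
    have hceq : col = n := by omega
    subst hceq
    rw [pvFillA, if_neg hnrow]
    have hg0 : rem.getD col 0 = 0 := by
      rw [List.getD_eq_getElem?_getD, List.getElem?_eq_none_iff.mpr (by omega)]; rfl
    rw [show (0 < rem.getD row 0 && 0 < rem.getD col 0) = false from by rw [hg0]; simp]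
    simp only [Bool.false_eq_true, if_false, List.nil_append]
    rw [feas_eq _ col row col rem hrc hmat, pool_nil]
    by_cases hfeas : feasC col rem row col = true
    · have hfacts := (feasC_true_iff col rem row col).mp hfeas
      have hk0 : rem.getD row 0 = 0 := by
        have := hfacts row hrown
        unfold capC at this
        rw [if_neg (by omega), if_pos rfl, if_neg (by omega : ¬ col < col - 1)] at this
        omega
      rw [if_pos hfeas, hk0, combos_zero]
      have hnx1 : pvNext col row col = (row+1, row+2) := by
        unfold pvNext; rw [if_neg (by omega)]
      rw [hnx1]
      have hdecid : altDec (rem.set row 0) [] = rem := by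
        show rem.set row 0 = rem
        exact set_self_eq rem row hk0
      simp only [List.flatMap_cons, List.flatMap_nil, List.append_nil, hdecid]
      by_cases hr1 : row + 1 < col
      · have hguard2 : ∀ j, row + 1 ≤ j → j < col →
            0 ≤ rem.getD j 0 ∧ rem.getD j 0 ≤ (col : Int) - 1 - ((row : Int) + 1) := by
          intro j hj1 hj2
          have := hfacts j hj2
          unfold capC at this
          rw [if_neg (by omega), if_neg (by omega), if_neg (by omega : ¬ col < j)] at this
          omega
        have h02 : ∀ j, j < row + 1 → rem.getD j 0 = 0 := by
          intro j hj
          rcases Nat.lt_or_ge j row with h | h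
          · exact h0 j h
          · have hjr : j = row := by omega
            rw [hjr]; exact hk0
        have hfin := hadvB rem P hlen h02
          (fun a b hab hbn hg => hmat a b hab hbn (pvGt_mono_row _ _ _ _ _ hg))
          hguard2 hr1
        rw [hfin]
      · -- row + 1 = n: the accepting leaf
        have hreq : row + 1 = col := by omega
        rw [pvFillA, if_pos (by omega : col ≤ row + 1)]
        have hall : rem.all (· == 0) = true := by
          apply list_all_zero rem col hlen
          intro j hj
          rcases Nat.lt_or_ge j row with h | h
          · exact h0 j h
          · have hjr : j = row := by omega
            rw [hjr]; exact hk0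
        rw [if_pos hall, hreq]
        have hrows : altRows col col rem = [[]] := by
          rw [altRows]
          simp
        rw [hrows]
        simp
    · rw [Bool.not_eq_true] at hfeas
      rw [if_neg (by rw [hfeas]; simp)]
      have hpn : altPool col (col+1) rem = [] := by
        unfold altPool
        simp [show col - (col+1) = 0 by omega]
      rw [← hpn]
      exact (dead_flatMap col row col rem rem hlen hrown (le_of_lt hrc) (le_refl col) h0 hfeas
        (fun s => fun tail => altBuild col (pre ++ (P ++ s) :: tail))).symm
termination_by row col => (n - row, n + 2 - col)
decreasing_by
  all_goals first
    | exact Prod.Lex.right _ (by omega)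
    | exact Prod.Lex.left _ _ (by omega)


-- ===== VERDICT (by name: the statement is the Claim_ definition above) =====
theorem generate_adjacency_matrices_py_spec : Claim_equal_generate_adjacency_matrices_py := by
  intro deg_seq _ _
  unfold Spec_generate_adjacency_matrices_py
  unfold generate_adjacency_matrices_py generate_adjacency_matrices_py_alt
  cases deg_seq with
  | nil =>
    rw [pvFillA, altRows]
    simp
    rfl
  | cons d ds =>
    have hn1 : 1 ≤ (d :: ds).length := by simp
    have hmrep : (List.replicate (d :: ds).length (List.replicate (d :: ds).length (0 : Int))) =
        altBuild (d :: ds).length ([] ++ [[]]) := by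
      rw [List.nil_append]
      exact (build_single_nil _).symm
    rw [hmrep]
    rw [pvMain (d :: ds).length 0 1 (d :: ds) [] [] (by omega) (by omega) (by omega) rfl rfl
      (fun j hj => absurd hj (Nat.not_lt_zero j))
      (by
        intro a b hab hbn hgt
        rw [List.nil_append, build_single_nil]
        exact pvAt_replicate _ _ _)]
    by_cases hg : ∀ j, j < (d :: ds).length →
        0 ≤ (d :: ds).getD j 0 ∧ (d :: ds).getD j 0 ≤ ((d :: ds).length : Int) - 1
    · rw [altRows_unfold (d :: ds).length 0 (d :: ds) (by omega)
        (by
          intro j _ hj2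
          have := hg j hj2
          push_cast
          omega)]
      rw [List.map_flatMap]
      simp only [Nat.zero_add]
      congr 1
      funext s
      rw [List.map_map]
      congr 1
    · push_neg at hg
      obtain ⟨j, hjn, hviol⟩ := hg
      have hcapj : capC (d :: ds).length j 0 0 ≤ ((d :: ds).length : Int) - 1 := by
        unfold capC
        split_ifs <;> omega
      have hfeas : feasC (d :: ds).length (d :: ds) 0 0 = false := by
        by_contra hc
        rw [Bool.not_eq_false] at hc
        have := (feasC_true_iff _ _ _ _).mp hc j hjn
        have hv := hviol this.1
        omega
      have hdeadL := dead_flatMap (d :: ds).length 0 0 (d :: ds) (d :: ds) rfl (by omega)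
        (by omega) (by omega) (fun j hj => absurd hj (Nat.not_lt_zero j)) hfeas
        (fun s => fun tail => altBuild (d :: ds).length ([] ++ ([] ++ s) :: tail))
      have hdeadR : altRows (d :: ds).length 0 (d :: ds) = [] := by
        apply altRows_dead _ 0 _ j (Nat.zero_le j) hjn
        rcases lt_or_ge ((d :: ds).getD j 0) 0 with h | h
        · exact Or.inl h
        · right
          have := hviol h
          push_cast
          omega
      rw [hdeadR]
      simp only [Nat.zero_add] at hdeadL ⊢
      rw [hdeadL]
      rfl
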